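-- pv_equiv track=rewrite | github.com/raeez/chiral-bar-cobar | compute/lib/genus2_multichannel.py | _half_edge_channels_at_vertex
-- ===== SOURCE A (Python) =====
-- from typing import Any, Dict, List, Optional, Tuple
--
-- GENUS2_GRAPHS = [
--     {
--         'name': 'smooth',
--         'vertices': [(2, 0)],
--         'edges': [],
--         'aut': 1,
--     },
--     {
--         'name': 'fig_eight',
--         'vertices': [(1, 2)],
--         'edges': [('self', 0)],
--         'aut': 2,
--     },
--     {
--         'name': 'banana',
--         'vertices': [(0, 4)],
--         'edges': [('self', 0), ('self', 0)],
--         'aut': 8,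
--     },
--     {
--         'name': 'dumbbell',
--         'vertices': [(1, 1), (1, 1)],
--         'edges': [('bridge', 0, 1)],
--         'aut': 2,
--     },
--     {
--         'name': 'theta',
--         'vertices': [(0, 3), (0, 3)],
--         'edges': [('bridge', 0, 1), ('bridge', 0, 1), ('bridge', 0, 1)],
--         'aut': 12,
--     },
--     {
--         'name': 'lollipop',
--         'vertices': [(0, 3), (1, 1)],
--         'edges': [('self', 0), ('bridge', 0, 1)],
--         'aut': 2,
--     },
--     {
--         'name': 'barbell',
--         'vertices': [(0, 3), (0, 3)],
--         'edges': [('self', 0), ('self', 1), ('bridge', 0, 1)],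
--         'aut': 8,
--     },
-- ]
--
-- def _half_edge_channels_at_vertex(graph_idx: int,
--                                    sigma: Tuple[str, ...]) -> List[List[str]]:
--     """For each vertex, return the list of half-edge channels.
--
--     Each bridge edge (v1,v2) contributes one half-edge to v1 and one to v2.
--     Each self-loop at v contributes two half-edges to v (both same channel).
--     """
--     G = GENUS2_GRAPHS[graph_idx]
--     n_v = len(G['vertices'])
--     channels_at_v: List[List[str]] = [[] for _ in range(n_v)]
--     for edge_idx, edge in enumerate(G['edges']):
--         ch = sigma[edge_idx]
--         if edge[0] == 'self':
--             v = edge[1]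
--             channels_at_v[v].append(ch)
--             channels_at_v[v].append(ch)
--         elif edge[0] == 'bridge':
--             v1, v2 = edge[1], edge[2]
--             channels_at_v[v1].append(ch)
--             channels_at_v[v2].append(ch)
--     return channels_at_v
-- ===== SOURCE B (Python) =====
-- from typing import List, Tuple
--
-- GENUS2_GRAPHS = [
--     {'name': 'smooth', 'vertices': [(2, 0)], 'edges': [], 'aut': 1},
--     {'name': 'fig_eight', 'vertices': [(1, 2)], 'edges': [('self', 0)], 'aut': 2},
--     {'name': 'banana', 'vertices': [(0, 4)], 'edges': [('self', 0), ('self', 0)], 'aut': 8},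
--     {'name': 'dumbbell', 'vertices': [(1, 1), (1, 1)], 'edges': [('bridge', 0, 1)], 'aut': 2},
--     {'name': 'theta', 'vertices': [(0, 3), (0, 3)],
--      'edges': [('bridge', 0, 1), ('bridge', 0, 1), ('bridge', 0, 1)], 'aut': 12},
--     {'name': 'lollipop', 'vertices': [(0, 3), (1, 1)], 'edges': [('self', 0), ('bridge', 0, 1)], 'aut': 2},
--     {'name': 'barbell', 'vertices': [(0, 3), (0, 3)],
--      'edges': [('self', 0), ('self', 1), ('bridge', 0, 1)], 'aut': 8},
-- ]
--
--
-- def _half_edge_channels_at_vertex(graph_idx: int,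
--                                   sigma: Tuple[str, ...]) -> List[List[str]]:
--     """Per-vertex gather: for each vertex, collect its half-edge channels
--     by scanning the edge list in order."""
--     G = GENUS2_GRAPHS[graph_idx]
--     out: List[List[str]] = []
--     for v in range(len(G['vertices'])):
--         chans: List[str] = []
--         for edge_idx, edge in enumerate(G['edges']):
--             ch = sigma[edge_idx]
--             if edge[0] == 'self':
--                 if edge[1] == v:
--                     chans += [ch, ch]
--             else:
--                 if edge[1] == v:
--                     chans.append(ch)
--                 if edge[2] == v:
--                     chans.append(ch)
--         out.append(chans)
--     return out
-- ===== Notes on version B (the rewrite author's own statement) =====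
-- stated objective: alternative
-- what changed: Replaces A's scatter (one pass over edges, appending into per-vertex buckets by index) with a per-vertex gather (for each vertex, scan the edge list and collect the channels of its incident half-edges); no indexed mutation of the output remains.
import Mathlib
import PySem

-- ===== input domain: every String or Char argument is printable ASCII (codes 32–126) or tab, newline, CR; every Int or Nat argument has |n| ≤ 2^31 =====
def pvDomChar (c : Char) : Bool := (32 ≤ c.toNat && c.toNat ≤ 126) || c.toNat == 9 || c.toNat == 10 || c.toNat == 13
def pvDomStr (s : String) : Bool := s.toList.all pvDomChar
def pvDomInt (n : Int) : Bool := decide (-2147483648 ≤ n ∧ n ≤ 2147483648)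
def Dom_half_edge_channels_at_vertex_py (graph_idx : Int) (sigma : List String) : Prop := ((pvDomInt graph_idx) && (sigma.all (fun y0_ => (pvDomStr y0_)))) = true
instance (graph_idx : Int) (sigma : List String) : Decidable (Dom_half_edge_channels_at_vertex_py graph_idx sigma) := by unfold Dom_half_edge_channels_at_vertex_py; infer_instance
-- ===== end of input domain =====

-- B replaces A's edge-scatter (indexed appends into per-vertex buckets) with a per-vertex gather over the edge list; alternative decomposition, same results.


-- ===== PORT A =====
-- edges of the fixed GENUS2_GRAPHS table: ('self', v) or ('bridge', v1, v2)
inductive GEdge where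
  | selfE : Int → GEdge
  | bridgeE : Int → Int → GEdge
deriving DecidableEq, Repr

-- GENUS2_GRAPHS, each entry as (number of vertices, edge list)
def genus2Graphs : List (Nat × List GEdge) :=
  [ (1, []),
    (1, [.selfE 0]),
    (1, [.selfE 0, .selfE 0]),
    (2, [.bridgeE 0 1]),
    (2, [.bridgeE 0 1, .bridgeE 0 1, .bridgeE 0 1]),
    (2, [.selfE 0, .bridgeE 0 1]),
    (2, [.selfE 0, .selfE 1, .bridgeE 0 1]) ]

-- channels_at_v[v].append(ch)  (v is a nonneg table constant, always in range)
def appendAt (xss : List (List String)) (v : Int) (ch : String) : List (List String) :=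
  xss.modify v.toNat (fun l => l ++ [ch])

def half_edge_channels_at_vertex_py (graph_idx : Int) (sigma : List String) : List (List String) :=
  match PySem.List.pyGet? genus2Graphs graph_idx with
  | none => []   -- Python raises IndexError here; excluded by Pre_
  | some G =>
    (PySem.List.enumerate G.2).foldl (fun acc p =>
      let ch := (PySem.List.pyGet? sigma p.1).getD ""   -- sigma[edge_idx]; none excluded by Pre_
      match p.2 with
      | .selfE v => appendAt (appendAt acc v ch) v ch
      | .bridgeE v1 v2 => appendAt (appendAt acc v1 ch) v2 ch)
      (List.replicate G.1 ([] : List String))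

-- ===== PORT B =====
def half_edge_channels_at_vertex_py_alt (graph_idx : Int) (sigma : List String) : List (List String) :=
  match PySem.List.pyGet? genus2Graphs graph_idx with
  | none => []   -- Python raises IndexError here; excluded by Pre_
  | some G =>
    (List.range G.1).map (fun v =>
      (PySem.List.enumerate G.2).foldl (fun chans p =>
        let ch := (PySem.List.pyGet? sigma p.1).getD ""
        match p.2 with
        | .selfE w => if w == (v : Int) then chans ++ [ch, ch] else chans
        | .bridgeE v1 v2 =>
          let chans := if v1 == (v : Int) then chans ++ [ch] else chans
          if v2 == (v : Int) then chans ++ [ch] else chans)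
        [])

-- ===== PRECONDITION & SPEC =====
-- Pre_ = exactly where A returns: a valid (possibly negative) index into the 7-graph table,
-- and sigma at least as long as that graph's edge list (else sigma[edge_idx] raises IndexError).
def Pre_half_edge_channels_at_vertex_py (graph_idx : Int) (sigma : List String) : Prop :=
  -7 ≤ graph_idx ∧ graph_idx < 7 ∧
    [0, 1, 2, 1, 3, 2, 3].getD (graph_idx % 7).toNat 0 ≤ sigma.length

instance (graph_idx : Int) (sigma : List String) : Decidable (Pre_half_edge_channels_at_vertex_py graph_idx sigma) := by unfold Pre_half_edge_channels_at_vertex_py; infer_instance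

def pvWitness_half_edge_channels_at_vertex_py : Int × List String := (6, ["a", "b", "c"])

def Spec_half_edge_channels_at_vertex_py (graph_idx : Int) (sigma : List String) (out : List (List String)) : Prop := out = half_edge_channels_at_vertex_py_alt graph_idx sigma
instance (graph_idx : Int) (sigma : List String) (out : List (List String)) : Decidable (Spec_half_edge_channels_at_vertex_py graph_idx sigma out) := by unfold Spec_half_edge_channels_at_vertex_py; infer_instance

-- ===== CLAIM (what is proved, stated in full; the proofs are below) =====
def Claim_equal_half_edge_channels_at_vertex_py : Prop := ∀ (graph_idx : Int) (sigma : List String), Dom_half_edge_channels_at_vertex_py graph_idx sigma → Pre_half_edge_channels_at_vertex_py graph_idx sigma → Spec_half_edge_channels_at_vertex_py graph_idx sigma (half_edge_channels_at_vertex_py graph_idx sigma)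

-- ===== LEMMAS AND PROOFS =====

-- ===== VERDICT (by name: the statement is the Claim_ definition above) =====
theorem half_edge_channels_at_vertex_py_spec : Claim_equal_half_edge_channels_at_vertex_py := by
  intro graph_idx sigma _ hpre
  obtain ⟨h1, h2, -⟩ := hpre
  unfold Spec_half_edge_channels_at_vertex_py
  interval_cases graph_idx <;>
    rcases sigma with _ | ⟨a, sigma⟩ <;> (try rcases sigma with _ | ⟨b, sigma⟩) <;>
    (try rcases sigma with _ | ⟨c, sigma⟩) <;> rfl
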